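-- pv_equiv track=rewrite | github.com/sandeep3535/learnpython | 01_List.py | list_of_dict
-- ===== SOURCE A (Python) =====
-- def list_of_dict(list_q, key_lst):
--     len_1 = int(len(list_q) / len(key_lst))
--     lst = []
--     for k in range(len_1):
--         lst.append(dict.fromkeys(key_lst))
--
--     # out_put = [list_q[i:i + len(key_lst)] for i in range(0, len(list_q), len(key_lst))]
--     out_put = []
--     for m in range(0, len(list_q), len(key_lst)):
--         out_put.append(list_q[m:m + len(key_lst)])
--
--     new_1 = []
--     for n in range(len(lst)):
--         new_1.append(dict(zip(list(lst[n].keys()), out_put[n])))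
--     return new_1
-- ===== SOURCE B (Python) =====
-- def list_of_dict(list_q, key_lst):
--     keys = dict.fromkeys(key_lst)
--     result = []
--     group = []
--     for v in list_q:
--         group.append(v)
--         if len(group) == len(key_lst):
--             result.append(dict(zip(keys, group)))
--             group = []
--     return result
-- ===== Notes on version B (the rewrite author's own statement) =====
-- stated objective: simpler
-- what changed: Replaced A's three index-driven passes (prebuild a list of dict skeletons, slice list_q into chunks by index arithmetic, then zip each skeleton's keys with its chunk) by a single pass that accumulates values into a group list and emits dict(zip(keys, group)) whenever the group is full; Pre_ excludes only key_lst = [], where A raises ZeroDivisionError.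
import Mathlib
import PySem

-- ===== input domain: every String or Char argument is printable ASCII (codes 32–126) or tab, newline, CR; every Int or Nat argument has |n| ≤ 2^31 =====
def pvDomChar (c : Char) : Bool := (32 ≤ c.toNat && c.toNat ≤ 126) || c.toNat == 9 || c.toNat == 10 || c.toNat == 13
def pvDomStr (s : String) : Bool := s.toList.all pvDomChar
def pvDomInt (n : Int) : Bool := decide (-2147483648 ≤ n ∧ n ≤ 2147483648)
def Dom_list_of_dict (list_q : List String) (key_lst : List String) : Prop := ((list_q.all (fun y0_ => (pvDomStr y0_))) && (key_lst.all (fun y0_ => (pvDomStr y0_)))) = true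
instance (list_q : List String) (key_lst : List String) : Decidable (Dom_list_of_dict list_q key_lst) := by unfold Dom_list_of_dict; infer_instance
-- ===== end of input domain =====

-- ===== PORT A =====
-- B groups the flat list in ONE pass that accumulates a group list and emits a dict when the
-- group is full, instead of A's three index-driven passes (prebuilt dict skeletons, slicing by
-- index arithmetic, zip); objective: simpler. key_lst = [], where A raises ZeroDivisionError,
-- is excluded by Pre_.
-- Port of A. dict.fromkeys(key_lst) is only ever read through .keys(), which is the ordered
-- dedup of key_lst (PySem.List.dedup); int(len(list_q)/len(key_lst)) is PySem.Int.truncdiv,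
-- exact for these list lengths.
def list_of_dict (list_q : List String) (key_lst : List String) : List (List (String × String)) :=
  let len_1 : Int := PySem.Int.truncdiv (PySem.List.len list_q) (PySem.List.len key_lst)
  let lst : List (List String) :=
    (PySem.List.pyRange 0 len_1 1).foldl (fun acc _ => acc ++ [PySem.List.dedup key_lst]) []
  let out_put : List (List String) :=
    (PySem.List.pyRange 0 (PySem.List.len list_q) (PySem.List.len key_lst)).foldl
      (fun acc m => acc ++ [PySem.List.slice list_q (some m) (some (m + PySem.List.len key_lst))]) []
  let new_1 : List (List (String × String)) :=
    (PySem.List.pyRange 0 (PySem.List.len lst) 1).foldl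
      (fun acc n =>
        acc ++ [(PySem.Dict.ofList ((PySem.List.pyGetD lst n []).zip (PySem.List.pyGetD out_put n []))).items]) []
  new_1

-- ===== PORT B =====
-- Port of B (Source B): keys = dict.fromkeys(key_lst) iterates as the ordered dedup of key_lst
-- (PySem.List.dedup); one pass over list_q accumulates `group` and, when the group reaches
-- len(key_lst), appends dict(zip(keys, group)) (as its items list) and resets the group.
def list_of_dict_alt (list_q : List String) (key_lst : List String) : List (List (String × String)) :=
  let keys : List String := PySem.List.dedup key_lst
  let st :=
    list_q.foldl
      (fun (st : List (List (String × String)) × List String) v =>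
        let group := st.2 ++ [v]
        if PySem.List.len group = PySem.List.len key_lst
        then (st.1 ++ [(PySem.Dict.ofList (keys.zip group)).items], [])
        else (st.1, group))
      ([], [])
  st.1

-- ===== PRECONDITION & SPEC =====
-- Pre_ excludes exactly key_lst = [], where Python A raises ZeroDivisionError.
def Pre_list_of_dict (list_q : List String) (key_lst : List String) : Prop := key_lst ≠ []
instance (list_q : List String) (key_lst : List String) : Decidable (Pre_list_of_dict list_q key_lst) := by
  unfold Pre_list_of_dict; infer_instance
def pvWitness_list_of_dict : List String × List String := (["a", "b", "c", "d"], ["x", "y"])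
def Spec_list_of_dict (list_q : List String) (key_lst : List String) (out : List (List (String × String))) : Prop :=
  out = list_of_dict_alt list_q key_lst
instance (list_q : List String) (key_lst : List String) (out : List (List (String × String))) : Decidable (Spec_list_of_dict list_q key_lst out) := by
  unfold Spec_list_of_dict; infer_instance

-- ===== CLAIM (what is proved, stated in full; the proofs are below) =====
def Claim_equal_list_of_dict : Prop := ∀ (list_q : List String) (key_lst : List String), Dom_list_of_dict list_q key_lst → Pre_list_of_dict list_q key_lst → Spec_list_of_dict list_q key_lst (list_of_dict list_q key_lst)

-- ===== LEMMAS AND PROOFS =====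

-- Common reference shape: the list of completed groups, as a chunking recursion.
def pvGroups (ks : List String) (s : Nat) (l : List String) : List (List (String × String)) :=
  if _h : 0 < s ∧ s ≤ l.length then (ks.zip (l.take s)) :: pvGroups ks s (l.drop s) else []
  termination_by l.length
  decreasing_by simp; omega

-- The step function of B's single pass (the lambda inside list_of_dict_alt).
def pvStepB (keys : List String) (sInt : Int)
    (st : List (List (String × String)) × List String) (v : String) :
    List (List (String × String)) × List String :=
  let group := st.2 ++ [v]
  if PySem.List.len group = sInt
  then (st.1 ++ [(PySem.Dict.ofList (keys.zip group)).items], [])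
  else (st.1, group)

theorem pv_map_fst_zip (ks c : List String) : (ks.zip c).map Prod.fst = ks.take c.length := by
  induction ks generalizing c with
  | nil => simp
  | cons k ks ih => cases c with
    | nil => simp
    | cons v c => simp [ih]

-- dict(zip(ks, c)) for ks without duplicates: the items are exactly the zipped pairs
theorem pv_items_ofList_zip (ks c : List String) (hnd : ks.Nodup) :
    (PySem.Dict.ofList (ks.zip c)).items = ks.zip c := by
  have hfold : PySem.Dict.ofList (ks.zip c)
      = (ks.zip c).foldl (fun d p => d.insert p.1 p.2) PySem.Dict.empty := rfl
  rw [hfold]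
  have hnodup : ((ks.zip c).map Prod.fst).Nodup := by
    rw [pv_map_fst_zip]; exact hnd.sublist (List.take_sublist _ _)
  have := PySem.Dict.items_foldl_insert_fresh (ks.zip c) Prod.fst Prod.snd PySem.Dict.empty
      (fun a _ => by simp [PySem.Dict.contains, PySem.Dict.empty]) hnodup
  simpa using this

-- A's chunk list equals pvGroups
theorem pv_range_map_eq_groups (ks : List String) (s : Nat) (hs : 0 < s) :
    ∀ (N : Nat) (l : List String), l.length / s = N →
      (List.range N).map (fun n => ks.zip ((l.drop (s * n)).take s)) = pvGroups ks s l := by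
  intro N
  induction N with
  | zero =>
    intro l hl
    rw [pvGroups]
    have hlt : ¬ (0 < s ∧ s ≤ l.length) := by
      rintro ⟨-, h2⟩
      have := (Nat.one_le_div_iff hs).mpr h2
      omega
    simp [hlt]
  | succ N ih =>
    intro l hl
    have hle : s ≤ l.length := by
      by_contra hc
      rw [Nat.div_eq_of_lt (by omega)] at hl
      omega
    rw [pvGroups]
    simp only [hs, hle, and_self, dite_true]
    rw [List.range_succ_eq_map]
    simp only [List.map_cons, List.map_map, Nat.mul_zero, List.drop_zero]
    congr 1
    have hrec : (l.drop s).length / s = N := by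
      have h3 := Nat.add_div_right (l.length - s) hs
      have h4 : l.length - s + s = l.length := by omega
      rw [h4] at h3
      simp only [List.length_drop]
      have h5 : (l.length - s) / s + 1 = N + 1 := by rw [← h3, hl]
      exact Nat.add_right_cancel h5
    rw [← ih (l.drop s) hrec]
    apply List.map_congr_left
    intro n _
    simp only [Function.comp]
    rw [List.drop_drop]
    have hms : s * n.succ = s * n + s := Nat.mul_succ s n
    rw [hms, Nat.add_comm]

-- B's fold across one complete group of s elements
theorem pv_chunkB (keys : List String) (s : Nat) :
    ∀ (rest pre : List String) (res : List (List (String × String))),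
      pre.length + rest.length = s → rest ≠ [] →
      rest.foldl (pvStepB keys ((s : Nat) : Int)) (res, pre)
        = (res ++ [(PySem.Dict.ofList (keys.zip (pre ++ rest))).items], []) := by
  intro rest
  induction rest with
  | nil => intro pre res _ hne; exact absurd rfl hne
  | cons v rest2 ih =>
    intro pre res hlen _
    rw [List.foldl_cons]
    cases rest2 with
    | nil =>
      have hfull : PySem.List.len (pre ++ [v]) = ((s : Nat) : Int) := by
        simp at hlen; simp [PySem.List.len_eq]; omega
      simp only [pvStepB]
      rw [if_pos hfull, List.foldl_nil]
    | cons v2 rest3 =>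
      have hnot : ¬ PySem.List.len (pre ++ [v]) = ((s : Nat) : Int) := by
        simp at hlen; simp [PySem.List.len_eq]; omega
      simp only [pvStepB]
      rw [if_neg hnot]
      have := ih (pre ++ [v]) res (by simp at hlen ⊢; omega) (by simp)
      simpa using this

-- B's fold across a trailing partial group never appends
theorem pv_partialB (keys : List String) (s : Nat) :
    ∀ (c pre : List String) (res : List (List (String × String))),
      pre.length + c.length < s →
      ((c.foldl (pvStepB keys ((s : Nat) : Int)) (res, pre))).1 = res := by
  intro c
  induction c with
  | nil => intro pre res _; rfl
  | cons v c ih =>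
    intro pre res hlt
    rw [List.foldl_cons]
    have hnot : ¬ PySem.List.len (pre ++ [v]) = ((s : Nat) : Int) := by
      simp at hlt; simp [PySem.List.len_eq]; omega
    simp only [pvStepB]
    rw [if_neg hnot]
    exact ih (pre ++ [v]) res (by simp at hlt ⊢; omega)

-- B's whole pass equals pvGroups
theorem pv_topB (keys : List String) (s : Nat) (hnd : keys.Nodup) (hs : 0 < s)
    (l : List String) (res : List (List (String × String))) :
    ((l.foldl (pvStepB keys ((s : Nat) : Int)) (res, []))).1 = res ++ pvGroups keys s l := by
  by_cases hle : s ≤ l.length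
  · rw [pvGroups]
    simp only [hs, hle, and_self, dite_true]
    conv_lhs => rw [← List.take_append_drop s l]
    rw [List.foldl_append]
    have hlen : (List.take s l).length = s := by simp [hle]
    have htake := pv_chunkB keys s (List.take s l) [] res (by simp [hlen]) (by
      intro hnil; rw [hnil] at hlen; simp at hlen; omega)
    simp only [List.nil_append] at htake
    rw [htake]
    rw [pv_topB keys s hnd hs (List.drop s l)
      (res ++ [(PySem.Dict.ofList (keys.zip (List.take s l))).items])]
    rw [pv_items_ofList_zip _ _ hnd]
    simp
  · rw [pvGroups]
    have hnot : ¬ (0 < s ∧ s ≤ l.length) := fun hc => hle hc.2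
    simp only [hnot, dite_false, List.append_nil]
    exact pv_partialB keys s l [] res (by simp; omega)
  termination_by l.length
  decreasing_by simp; omega

-- A equals pvGroups on the deduplicated keys
theorem list_of_dict_eq_groups (list_q key_lst : List String) (h : key_lst ≠ []) :
    list_of_dict list_q key_lst = pvGroups (PySem.List.dedup key_lst) key_lst.length list_q := by
  have hs : 0 < key_lst.length := List.length_pos_of_ne_nil h
  unfold list_of_dict
  simp only [PySem.List.len_eq, PySem.List.foldl_append_singleton_eq_map, List.nil_append]
  have htd : PySem.Int.truncdiv (↑list_q.length) (↑key_lst.length)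
      = ((list_q.length / key_lst.length : Nat) : Int) := by
    simp [PySem.Int.truncdiv, Int.tdiv]
  rw [htd]
  rw [PySem.List.pyRange_of_pos (a := 0) (b := (list_q.length : Int))
    (s := (key_lst.length : Int)) (by exact_mod_cast hs)]
  simp only [PySem.List.pyRange_one, List.map_map, List.length_map, List.length_range,
    Int.sub_zero, Int.toNat_natCast]
  rw [← pv_range_map_eq_groups (PySem.List.dedup key_lst) key_lst.length hs
    (list_q.length / key_lst.length) list_q rfl]
  apply List.map_congr_left
  intro n hn
  rw [List.mem_range] at hn
  simp only [Function.comp, zero_add]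
  rw [PySem.List.pyGetD_natCast, PySem.List.getD_map_range _ _ _ _ hn]
  have hL : (0 : Int) < (list_q.length : Int) := by
    have hne : list_q.length ≠ 0 := by
      intro h0; rw [h0] at hn; simp at hn
    exact_mod_cast Nat.pos_of_ne_zero hne
  rw [if_pos hL]
  have hM : (((list_q.length : Int) + (key_lst.length : Int) - 1) / (key_lst.length : Int)).toNat
      = (list_q.length + key_lst.length - 1) / key_lst.length := by
    have h1 : ((list_q.length : Int) + (key_lst.length : Int) - 1)
        = ((list_q.length + key_lst.length - 1 : Nat) : Int) := by omega
    rw [h1, ← Int.natCast_div, Int.toNat_natCast]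
  rw [hM]
  have hnM : n < (list_q.length + key_lst.length - 1) / key_lst.length :=
    lt_of_lt_of_le hn (Nat.div_le_div_right (by omega))
  rw [PySem.List.pyGetD_natCast, PySem.List.getD_map_range _ _ _ _ hnM]
  simp only [Function.comp_apply]
  have hcast : ((key_lst.length : Int) * (n : Int)) = ((key_lst.length * n : Nat) : Int) := by
    push_cast; ring
  rw [hcast, PySem.List.slice_natCast_add]
  rw [pv_items_ofList_zip _ _ (PySem.List.nodup_dedup key_lst)]

-- B equals pvGroups on the deduplicated keys
theorem list_of_dict_alt_eq_groups (list_q key_lst : List String) (h : key_lst ≠ []) :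
    list_of_dict_alt list_q key_lst
      = pvGroups (PySem.List.dedup key_lst) key_lst.length list_q := by
  have hs : 0 < key_lst.length := List.length_pos_of_ne_nil h
  have halt : list_of_dict_alt list_q key_lst
      = (list_q.foldl (pvStepB (PySem.List.dedup key_lst) (PySem.List.len key_lst)) ([], [])).1 := rfl
  rw [halt]
  have hlen : PySem.List.len key_lst = ((key_lst.length : Nat) : Int) := by
    simp [PySem.List.len_eq]
  rw [hlen]
  rw [pv_topB (PySem.List.dedup key_lst) key_lst.length (PySem.List.nodup_dedup key_lst) hs
    list_q []]
  simp

-- ===== VERDICT (by name: the statement is the Claim_ definition above) =====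
theorem list_of_dict_spec : Claim_equal_list_of_dict := by
  intro list_q key_lst _ hpre
  unfold Spec_list_of_dict
  rw [list_of_dict_eq_groups list_q key_lst hpre,
    list_of_dict_alt_eq_groups list_q key_lst hpre]
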